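-- pv_equiv track=rewrite | github.com/TheExGenesis/birdseye | src/modal_app/modal_app.py | make_batches
-- ===== SOURCE A (Python) =====
-- openai_TOKEN_LIMIT_PER_MINUTE = 100000
--
-- CHAR_PER_TOKEN = 4
--
-- def make_batches(cluster_label_data):
--     max_batch_chars = openai_TOKEN_LIMIT_PER_MINUTE * CHAR_PER_TOKEN
--     batches = [[]]
--     for cluster_id, cluster_str in cluster_label_data:
--         cur_len = sum(len(cluster_str) for _, cluster_str in batches[-1])
--         if cur_len + len(cluster_str) > max_batch_chars:
--             batches.append([])
--         batches[-1].append((cluster_id, cluster_str))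
--     return batches
-- ===== SOURCE B (Python) =====
-- openai_TOKEN_LIMIT_PER_MINUTE = 100000
--
-- CHAR_PER_TOKEN = 4
--
-- def make_batches(cluster_label_data):
--     max_batch_chars = openai_TOKEN_LIMIT_PER_MINUTE * CHAR_PER_TOKEN
--     done = []
--     cur = []
--     cur_len = 0
--     for cluster_id, cluster_str in cluster_label_data:
--         n = len(cluster_str)
--         if cur_len + n > max_batch_chars:
--             done.append(cur)
--             cur = [(cluster_id, cluster_str)]
--             cur_len = n
--         else:
--             cur.append((cluster_id, cluster_str))
--             cur_len += n
--     done.append(cur)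
--     return done
-- ===== Notes on version B (the rewrite author's own statement) =====
-- stated objective: faster
-- what changed: B maintains a running character count of the current batch (reset when a new batch is opened) instead of re-summing the last batch's string lengths on every iteration.
import Mathlib
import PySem

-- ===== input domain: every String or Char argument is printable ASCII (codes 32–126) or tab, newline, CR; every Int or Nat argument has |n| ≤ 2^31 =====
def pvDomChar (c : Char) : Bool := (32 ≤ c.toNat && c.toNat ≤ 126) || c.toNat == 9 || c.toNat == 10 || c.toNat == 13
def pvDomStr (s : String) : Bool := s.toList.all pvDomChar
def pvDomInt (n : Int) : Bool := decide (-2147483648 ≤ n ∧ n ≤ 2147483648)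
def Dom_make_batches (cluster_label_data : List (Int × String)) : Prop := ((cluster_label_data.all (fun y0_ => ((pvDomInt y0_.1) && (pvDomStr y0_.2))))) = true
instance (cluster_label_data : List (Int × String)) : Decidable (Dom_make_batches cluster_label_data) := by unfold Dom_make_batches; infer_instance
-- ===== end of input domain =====

-- B replaces A's per-iteration re-summation of the last batch with a running length counter: O(n) instead of O(n*b).


-- ===== PORT A =====
-- batches[-1] on a nonempty list of batches (the loop keeps batches nonempty; [] default is unreachable)
def pvLastBatch (bs : List (List (Int × String))) : List (Int × String) := bs.getLast?.getD []

-- one loop iteration of A: recompute the last batch's length, maybe open a new batch, append to batches[-1]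
def pvStepA (bs : List (List (Int × String))) (x : Int × String) : List (List (Int × String)) :=
  let cur_len : Int := ((pvLastBatch bs).map (fun p => PySem.Str.len p.2)).sum
  let bs' := if cur_len + PySem.Str.len x.2 > 400000 then bs ++ [[]] else bs
  bs'.dropLast ++ [pvLastBatch bs' ++ [x]]

def make_batches (cluster_label_data : List (Int × String)) : List (List (Int × String)) :=
  cluster_label_data.foldl pvStepA [[]]

-- ===== PORT B =====
-- one loop iteration of B: running counter, flush on overflow
def pvStepB (st : List (List (Int × String)) × List (Int × String) × Int) (x : Int × String) :
    List (List (Int × String)) × List (Int × String) × Int :=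
  let n := PySem.Str.len x.2
  if st.2.2 + n > 400000 then (st.1 ++ [st.2.1], [x], n)
  else (st.1, st.2.1 ++ [x], st.2.2 + n)

def make_batches_alt (cluster_label_data : List (Int × String)) : List (List (Int × String)) :=
  let st := cluster_label_data.foldl pvStepB ([], [], 0)
  st.1 ++ [st.2.1]

-- ===== PRECONDITION & SPEC =====
def Spec_make_batches (cluster_label_data : List (Int × String)) (out : List (List (Int × String))) : Prop := out = make_batches_alt cluster_label_data
instance (cluster_label_data : List (Int × String)) (out : List (List (Int × String))) : Decidable (Spec_make_batches cluster_label_data out) := by unfold Spec_make_batches; infer_instance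

-- ===== CLAIM (what is proved, stated in full; the proofs are below) =====
def Claim_equal_make_batches : Prop := ∀ (cluster_label_data : List (Int × String)), Dom_make_batches cluster_label_data → Spec_make_batches cluster_label_data (make_batches cluster_label_data)

-- ===== LEMMAS AND PROOFS =====

-- invariant: if B's state is (done, cur, n) with n the summed length of cur,
-- then A's fold from done ++ [cur] equals B's fold finished off with done ++ [cur].
theorem pv_inv (l : List (Int × String)) :
    ∀ (done : List (List (Int × String))) (cur : List (Int × String)),
      l.foldl pvStepA (done ++ [cur]) =
        (let st := l.foldl pvStepB (done, cur, (cur.map (fun p => PySem.Str.len p.2)).sum)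
         st.1 ++ [st.2.1]) := by
  induction l with
  | nil => intro done cur; simp
  | cons x t ih =>
    intro done cur
    simp only [List.foldl_cons]
    have hlast : pvLastBatch (done ++ [cur]) = cur := by
      simp [pvLastBatch]
    by_cases h : (cur.map (fun p => PySem.Str.len p.2)).sum + PySem.Str.len x.2 > 400000
    · have hstepA : pvStepA (done ++ [cur]) x = (done ++ [cur]) ++ [[x]] := by
        simp only [pvStepA, hlast]
        rw [if_pos h]
        simp [pvLastBatch]
      have hstepB : pvStepB (done, cur, (cur.map (fun p => PySem.Str.len p.2)).sum) x
          = (done ++ [cur], [x], PySem.Str.len x.2) := by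
        simp only [pvStepB]
        rw [if_pos h]
      rw [hstepA, hstepB]
      have := ih (done ++ [cur]) [x]
      simpa using this
    · have hstepA : pvStepA (done ++ [cur]) x = done ++ [cur ++ [x]] := by
        simp only [pvStepA, hlast]
        rw [if_neg h]
        simp [pvLastBatch]
      have hstepB : pvStepB (done, cur, (cur.map (fun p => PySem.Str.len p.2)).sum) x
          = (done, cur ++ [x], (cur.map (fun p => PySem.Str.len p.2)).sum + PySem.Str.len x.2) := by
        simp only [pvStepB]
        rw [if_neg h]
      rw [hstepA, hstepB]
      have := ih done (cur ++ [x])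
      simpa using this

-- ===== VERDICT (by name: the statement is the Claim_ definition above) =====
theorem make_batches_spec : Claim_equal_make_batches := by
  intro l _
  show make_batches l = make_batches_alt l
  have := pv_inv l [] []
  simpa [make_batches, make_batches_alt] using this
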